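-- pv_equiv track=rewrite | github.com/ananonymousauthor-1024/AR-Trip | src/utils.py | count_best_index
-- ===== SOURCE A (Python) =====
-- def count_best_index(lst1, lst2, lst3):
--
--     best_indices = [i for i, value in enumerate(lst1) if value ==
--                     max(lst1)]
--     sublist_2 = [lst2[index] for index in best_indices]
--
--     best_indices = [value for i, value in enumerate(best_indices) if sublist_2[i] ==
--                     max(sublist_2)]
--
--     sublist_3 = [lst3[index] for index in best_indices]
--     best_indices = [value for i, value in enumerate(best_indices) if sublist_3[i] ==
--                     min(sublist_3)]
--     best_index = best_indices[-1]
--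
--     return best_index
-- ===== SOURCE B (Python) =====
-- def count_best_index(lst1, lst2, lst3):
--     m1 = max(lst1)
--     m2 = max(lst2[i] for i, v in enumerate(lst1) if v == m1)
--     best = -1
--     m3 = 0
--     for i, v in enumerate(lst1):
--         if v == m1 and lst2[i] == m2:
--             if best < 0 or lst3[i] <= m3:
--                 best, m3 = i, lst3[i]
--     return best
-- ===== Notes on version B (the rewrite author's own statement) =====
-- stated objective: faster
-- what changed: A rebuilds candidate index lists with three filter comprehensions (re-evaluating max() for every element scanned) plus parallel sublists; B computes the two maxima once and then keeps a single running best (index, lst3-value) pair in one loop, ties resolved to the later index.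
import Mathlib
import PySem

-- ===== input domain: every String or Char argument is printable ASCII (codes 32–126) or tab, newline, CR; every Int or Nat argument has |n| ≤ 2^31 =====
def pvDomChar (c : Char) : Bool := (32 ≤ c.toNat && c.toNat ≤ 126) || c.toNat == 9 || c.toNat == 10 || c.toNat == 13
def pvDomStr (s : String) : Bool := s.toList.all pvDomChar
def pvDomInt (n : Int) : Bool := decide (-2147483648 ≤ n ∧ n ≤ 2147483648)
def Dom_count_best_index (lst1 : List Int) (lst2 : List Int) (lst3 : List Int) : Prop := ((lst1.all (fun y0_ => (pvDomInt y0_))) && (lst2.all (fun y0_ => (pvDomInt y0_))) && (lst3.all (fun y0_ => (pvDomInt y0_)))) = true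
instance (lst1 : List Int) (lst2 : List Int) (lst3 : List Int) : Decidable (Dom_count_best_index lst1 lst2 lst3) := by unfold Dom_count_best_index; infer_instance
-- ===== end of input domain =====

-- B replaces A's repeated filter-rebuild passes (with max() recomputed per comprehension element)
-- by one max pass, one max-over-candidates pass and a single running-best loop; measurably faster.


-- ===== PORT A =====
def count_best_index (lst1 : List Int) (lst2 : List Int) (lst3 : List Int) : Int :=
  let b1 := ((PySem.List.enumerate lst1 0).filter
      (fun p => p.2 == (PySem.List.max? lst1 (fun x => x)).getD 0)).map (fun p => p.1)
  let s2 := b1.map (fun i => PySem.List.pyGetD lst2 i 0)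
  let b2 := ((PySem.List.enumerate b1 0).filter
      (fun p => PySem.List.pyGetD s2 p.1 0 == (PySem.List.max? s2 (fun x => x)).getD 0)).map (fun p => p.2)
  let s3 := b2.map (fun i => PySem.List.pyGetD lst3 i 0)
  let b3 := ((PySem.List.enumerate b2 0).filter
      (fun p => PySem.List.pyGetD s3 p.1 0 == (PySem.List.min? s3 (fun x => x)).getD 0)).map (fun p => p.2)
  PySem.List.pyGetD b3 (-1) 0

-- ===== PORT B =====
def count_best_index_alt (lst1 : List Int) (lst2 : List Int) (lst3 : List Int) : Int :=
  let m1 := (PySem.List.max? lst1 (fun x => x)).getD 0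
  let m2 := (PySem.List.max?
      (((PySem.List.enumerate lst1 0).filter (fun p => p.2 == m1)).map
        (fun p => PySem.List.pyGetD lst2 p.1 0)) (fun x => x)).getD 0
  let r := (PySem.List.enumerate lst1 0).foldl
      (fun (acc : Int × Int) p =>
        if p.2 == m1 && PySem.List.pyGetD lst2 p.1 0 == m2 then
          if acc.1 < 0 ∨ PySem.List.pyGetD lst3 p.1 0 ≤ acc.2 then
            (p.1, PySem.List.pyGetD lst3 p.1 0)
          else acc
        else acc)
      ((-1 : Int), (0 : Int))
  r.1

-- ===== PRECONDITION & SPEC =====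
-- Pre_ = exactly the inputs on which Python A returns: lst1 nonempty (max([]) raises), every index of a
-- maximal lst1 element is within lst2, and every such index that also carries the maximal lst2 value is
-- within lst3 (otherwise A raises IndexError).
def Pre_count_best_index (lst1 : List Int) (lst2 : List Int) (lst3 : List Int) : Prop :=
  lst1 ≠ [] ∧
  (∀ i < lst1.length, (∀ j < lst1.length, lst1.getD j 0 ≤ lst1.getD i 0) → i < lst2.length) ∧
  (∀ i < lst1.length, (∀ j < lst1.length, lst1.getD j 0 ≤ lst1.getD i 0) →
    (∀ j < lst1.length, (∀ k < lst1.length, lst1.getD k 0 ≤ lst1.getD j 0) →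
      lst2.getD j 0 ≤ lst2.getD i 0) → i < lst3.length)
instance (lst1 : List Int) (lst2 : List Int) (lst3 : List Int) : Decidable (Pre_count_best_index lst1 lst2 lst3) := by unfold Pre_count_best_index; infer_instance

def pvWitness_count_best_index : List Int × List Int × List Int := ([1, 2, 2], [5, 1, 1], [3, 2, 1])

def Spec_count_best_index (lst1 : List Int) (lst2 : List Int) (lst3 : List Int) (out : Int) : Prop := out = count_best_index_alt lst1 lst2 lst3
instance (lst1 : List Int) (lst2 : List Int) (lst3 : List Int) (out : Int) : Decidable (Spec_count_best_index lst1 lst2 lst3 out) := by unfold Spec_count_best_index; infer_instance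

-- ===== CLAIM (what is proved, stated in full; the proofs are below) =====
def Claim_equal_count_best_index : Prop := ∀ (lst1 : List Int) (lst2 : List Int) (lst3 : List Int), Dom_count_best_index lst1 lst2 lst3 → Pre_count_best_index lst1 lst2 lst3 → Spec_count_best_index lst1 lst2 lst3 (count_best_index lst1 lst2 lst3)


-- ===== LEMMAS AND PROOFS =====

-- default-independence of getLastD on a nonempty list
lemma getLastD_congr {a : Type} (l : List a) (h : l ≠ []) (d d' : a) :
    l.getLastD d = l.getLastD d' := by
  rw [List.getLastD_eq_getLast?, List.getLastD_eq_getLast?, List.getLast?_eq_some_getLast h]; rfl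

-- indices produced by enumerate _ 0 are nonnegative
lemma enum_fst_nonneg {a : Type} (xs : List a) {p : Int × a}
    (hp : p ∈ PySem.List.enumerate xs 0) : 0 ≤ p.1 := by
  rcases (PySem.List.mem_enumerate_iff xs 0 p).1 hp with ⟨k, hk, rfl⟩
  simp

-- A's "index back into the parallel sublist" comprehension collapses to a plain filter
lemma filt_enum (xs : List Int) (ys : List Int) (c : Int) :
    ((PySem.List.enumerate xs 0).filter
        (fun p => PySem.List.pyGetD (xs.map (fun i => PySem.List.pyGetD ys i 0)) p.1 0 == c)).map
      (fun p => p.2)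
    = xs.filter (fun i => PySem.List.pyGetD ys i 0 == c) := by
  have hcong : ∀ p ∈ PySem.List.enumerate xs 0,
      (PySem.List.pyGetD (xs.map (fun i => PySem.List.pyGetD ys i 0)) p.1 0 == c)
        = (PySem.List.pyGetD ys p.2 0 == c) := by
    intro p hp
    rcases (PySem.List.mem_enumerate_iff xs 0 p).1 hp with ⟨k, hk, rfl⟩
    simp only [zero_add, PySem.List.pyGetD_natCast]
    rw [PySem.List.getD_map_of_lt _ _ _ _ hk]
  rw [List.filter_congr hcong]
  have h2 : xs.filter (fun i => PySem.List.pyGetD ys i 0 == c)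
      = (((PySem.List.enumerate xs 0).map (fun p => p.2)).filter
          (fun i => PySem.List.pyGetD ys i 0 == c)) := by
    rw [PySem.List.map_snd_enumerate]
  rw [h2, List.filter_map]
  rfl

-- the running-min step once the accumulator holds a real candidate
def pstep (acc q : Int × Int) : Int × Int := if q.2 ≤ acc.2 then q else acc

-- with a nonnegative accumulator index the "best < 0" test is dead
lemma fold_drop_neg (l : List (Int × Int)) (a : Int × Int) (ha : 0 ≤ a.1)
    (hl : ∀ q ∈ l, 0 ≤ q.1) :
    List.foldl (fun acc q => if acc.1 < 0 ∨ q.2 ≤ acc.2 then q else acc) a l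
      = List.foldl pstep a l := by
  induction l generalizing a with
  | nil => rfl
  | cons q l ih =>
    have h1 : (if a.1 < 0 ∨ q.2 ≤ a.2 then q else a) = pstep a q := by
      have : ¬ a.1 < 0 := not_lt.2 ha
      unfold pstep
      by_cases h : q.2 ≤ a.2 <;> simp [h, this]
    rw [List.foldl_cons, List.foldl_cons, h1]
    refine ih (pstep a q) ?_ (fun r hr => hl r (List.mem_cons_of_mem _ hr))
    unfold pstep
    split
    · exact hl q (List.mem_cons_self ..)
    · exact ha

-- a left fold keeping ties to the later element computes the LAST minimum
lemma fold_min_last (l : List (Int × Int)) (a : Int × Int) :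
    List.foldl pstep a l
      = ((a :: l).filter (fun q => q.2 == List.foldl min a.2 (l.map Prod.snd))).getLastD a := by
  induction l generalizing a with
  | nil => simp [List.filter]
  | cons q l ih =>
    by_cases h : q.2 ≤ a.2
    · have hstep : pstep a q = q := by simp [pstep, h]
      rw [List.foldl_cons, hstep, ih q]
      have hm : List.foldl min a.2 ((q :: l).map Prod.snd)
          = List.foldl min q.2 (l.map Prod.snd) := by
        simp [min_eq_right h]
      rw [hm]
      have hm_le_q : List.foldl min q.2 (l.map Prod.snd) ≤ q.2 :=
        (PySem.List.foldl_min_le _ _).1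
      have hne : (List.filter (fun q' => q'.2 == List.foldl min q.2 (l.map Prod.snd)) (q :: l)) ≠ [] := by
        rcases PySem.List.foldl_min_mem (l.map Prod.snd) q.2 with he | he
        · exact List.ne_nil_of_mem (List.mem_filter.2 ⟨List.mem_cons_self .., by simp [he]⟩)
        · rcases List.mem_map.1 he with ⟨r, hr, hre⟩
          exact List.ne_nil_of_mem
            (List.mem_filter.2 ⟨List.mem_cons_of_mem _ hr, by simp [hre]⟩)
      rw [List.filter_cons (x := a)]
      by_cases ha2 : ((a.2 == List.foldl min q.2 (l.map Prod.snd)) = true)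
      · rw [if_pos ha2, List.getLastD_cons]
        exact getLastD_congr _ hne q a
      · rw [if_neg ha2]
        exact getLastD_congr _ hne q a
    · have hstep : pstep a q = a := by simp [pstep, h]
      rw [List.foldl_cons, hstep, ih a]
      have hm : List.foldl min a.2 ((q :: l).map Prod.snd)
          = List.foldl min a.2 (l.map Prod.snd) := by
        simp [min_eq_left (le_of_lt (lt_of_not_ge h))]
      rw [hm]
      have hq : ((q.2 == List.foldl min a.2 (l.map Prod.snd)) = false) := by
        have h1 : List.foldl min a.2 (l.map Prod.snd) ≤ a.2 :=
          (PySem.List.foldl_min_le _ _).1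
        have h2 : a.2 < q.2 := lt_of_not_ge h
        have : ¬ (q.2 = List.foldl min a.2 (l.map Prod.snd)) := by omega
        simp [this]
      rw [List.filter_cons (x := a), List.filter_cons (x := a),
          List.filter_cons (x := q), hq]
      simp

-- the central equivalence, on nonempty lst1
lemma key_equiv (lst1 lst2 lst3 : List Int) (h1 : lst1 ≠ []) :
    count_best_index lst1 lst2 lst3 = count_best_index_alt lst1 lst2 lst3 := by
  unfold count_best_index count_best_index_alt
  simp only []
  set m1 := (PySem.List.max? lst1 fun x => x).getD 0 with hm1
  set em := PySem.List.enumerate lst1 0 with hem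
  set C := em.filter (fun p => p.2 == m1) with hC
  set b1 := C.map (fun p => p.1) with hb1
  set s2 := List.map (fun i => PySem.List.pyGetD lst2 i 0) b1 with hs2
  set M2 := (PySem.List.max? s2 fun x => x).getD 0 with hM2
  -- collapse A's second comprehension to a filter on b1
  have hb2 := filt_enum b1 lst2 M2
  rw [← hs2] at hb2
  rw [hb2]
  set b2 := b1.filter (fun i => PySem.List.pyGetD lst2 i 0 == M2) with hb2'
  set s3 := List.map (fun i => PySem.List.pyGetD lst3 i 0) b2 with hs3
  set M3 := (PySem.List.min? s3 fun x => x).getD 0 with hM3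
  -- collapse A's third comprehension to a filter on b2
  have hb3 := filt_enum b2 lst3 M3
  rw [← hs3] at hb3
  rw [hb3]
  set b3 := b2.filter (fun i => PySem.List.pyGetD lst3 i 0 == M3) with hb3'
  -- B's candidate-value list is A's s2
  have hs2' : List.map (fun p => PySem.List.pyGetD lst2 p.1 0) C = s2 := by
    rw [hs2, hb1, List.map_map]; rfl
  rw [hs2', ← hM2]
  rw [PySem.List.foldl_if_eq_foldl_filter
        (fun p => p.2 == m1 && PySem.List.pyGetD lst2 p.1 0 == M2)
        (fun acc p => if acc.1 < 0 ∨ PySem.List.pyGetD lst3 p.1 0 ≤ acc.2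
          then (p.1, PySem.List.pyGetD lst3 p.1 0) else acc) em ((-1 : Int), (0 : Int))]
  set C2g := em.filter (fun p => p.2 == m1 && PySem.List.pyGetD lst2 p.1 0 == M2) with hC2
  -- b2 through C2g
  have hCC : List.filter (fun p => PySem.List.pyGetD lst2 p.1 0 == M2) C = C2g := by
    rw [hC, List.filter_filter, hC2]
    exact List.filter_congr (fun x _ => by rw [Bool.and_comm])
  have hb2C : b2 = C2g.map (fun p => p.1) := by
    rw [hb2', hb1, List.filter_map]
    simp only [Function.comp_def]
    rw [hCC]
  set E := C2g.filter (fun p => PySem.List.pyGetD lst3 p.1 0 == M3) with hE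
  have hb3E : b3 = E.map (fun p => p.1) := by
    rw [hb3', hb2C, List.filter_map]
    simp only [Function.comp_def]
    rw [← hE]
  have hs3' : List.map (fun p => PySem.List.pyGetD lst3 p.1 0) C2g = s3 := by
    rw [hs3, hb2C, List.map_map]; rfl
  -- nonemptiness chain
  have hCne : C ≠ [] := by
    obtain ⟨m, hm⟩ : ∃ m, PySem.List.max? lst1 (fun x => x) = some m := by
      cases hx : PySem.List.max? lst1 (fun x => x) with
      | none => exact absurd ((PySem.List.max?_eq_none_iff lst1 _).1 hx) h1
      | some m => exact ⟨m, rfl⟩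
    have hm1v : m1 = m := by rw [hm1, hm]; rfl
    obtain ⟨k, hk, hkv⟩ := List.mem_iff_getElem.1 (PySem.List.max?_mem hm)
    refine List.ne_nil_of_mem (l := C) (a := ((0 + (k : Int), lst1[k]) : Int × Int)) ?_
    refine List.mem_filter.2 ⟨(PySem.List.mem_enumerate_iff lst1 0 _).2 ⟨k, hk, rfl⟩, ?_⟩
    simp [hkv, hm1v]
  have hC2ne : C2g ≠ [] := by
    have hs2ne : s2 ≠ [] := by
      rw [← hs2']
      simp only [ne_eq, List.map_eq_nil_iff]
      exact hCne
    obtain ⟨M, hM⟩ : ∃ M, PySem.List.max? s2 (fun x => x) = some M := by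
      cases hx : PySem.List.max? s2 (fun x => x) with
      | none => exact absurd ((PySem.List.max?_eq_none_iff s2 _).1 hx) hs2ne
      | some M => exact ⟨M, rfl⟩
    have hM2v : M2 = M := by rw [hM2, hM]; rfl
    have hMmem : M ∈ s2 := PySem.List.max?_mem hM
    rw [← hs2'] at hMmem
    obtain ⟨p, hpC, hpv⟩ := List.mem_map.1 hMmem
    have hpem := List.mem_filter.1 (hC ▸ hpC)
    refine List.ne_nil_of_mem (l := C2g) (a := p) ?_
    refine List.mem_filter.2 ⟨hpem.1, ?_⟩
    simp only [Bool.and_eq_true]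
    exact ⟨hpem.2, by simp [hpv, hM2v]⟩
  have hEne : E ≠ [] := by
    have hs3ne : s3 ≠ [] := by
      rw [← hs3']
      simp only [ne_eq, List.map_eq_nil_iff]
      exact hC2ne
    obtain ⟨M, hM⟩ : ∃ M, PySem.List.min? s3 (fun x => x) = some M := by
      cases hx : PySem.List.min? s3 (fun x => x) with
      | none =>
        exact absurd ((PySem.List.min?_eq_none_iff s3 _).1 hx) hs3ne
      | some M => exact ⟨M, rfl⟩
    have hM3v : M3 = M := by rw [hM3, hM]; rfl
    have hMmem : M ∈ s3 := PySem.List.min?_mem hM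
    rw [← hs3'] at hMmem
    obtain ⟨p, hpC, hpv⟩ := List.mem_map.1 hMmem
    refine List.ne_nil_of_mem (l := E) (a := p) (List.mem_filter.2 ⟨hpC, by simp [hpv, hM3v]⟩)
  -- move B's fold to (index, lst3-value) pairs
  rw [show (List.foldl
        (fun acc p =>
          if acc.1 < 0 ∨ PySem.List.pyGetD lst3 p.1 0 ≤ acc.2 then (p.1, PySem.List.pyGetD lst3 p.1 0) else acc)
        ((-1 : Int), (0 : Int)) C2g)
      = List.foldl (fun acc q => if acc.1 < 0 ∨ q.2 ≤ acc.2 then q else acc) ((-1 : Int), (0 : Int))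
          (C2g.map (fun p => (p.1, PySem.List.pyGetD lst3 p.1 0))) from by rw [List.foldl_map]]
  obtain ⟨c, C2', hCc⟩ := List.exists_cons_of_ne_nil hC2ne
  have hmemEm : ∀ p ∈ C2g, (0 : Int) ≤ p.1 := by
    intro p hp
    exact enum_fst_nonneg lst1 (List.mem_filter.1 (hC2 ▸ hp)).1
  have hcC2 : c ∈ C2g := by rw [hCc]; exact List.mem_cons_self ..
  rw [hCc, List.map_cons, List.foldl_cons]
  rw [if_pos (Or.inl (by norm_num))]
  rw [fold_drop_neg (C2'.map (fun p => (p.1, PySem.List.pyGetD lst3 p.1 0)))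
        ((c.1, PySem.List.pyGetD lst3 c.1 0)) (hmemEm c hcC2) ?hnn]
  case hnn =>
    intro q hq
    obtain ⟨p, hp, rfl⟩ := List.mem_map.1 hq
    exact hmemEm p (by rw [hCc]; exact List.mem_cons_of_mem _ hp)
  rw [fold_min_last]
  have hmapmap : List.map Prod.snd (C2'.map (fun p => (p.1, PySem.List.pyGetD lst3 p.1 0)))
      = C2'.map (fun p => PySem.List.pyGetD lst3 p.1 0) := by
    rw [List.map_map]; rfl
  have hM3v : List.foldl min (c.1, PySem.List.pyGetD lst3 c.1 0).2
      (List.map Prod.snd (C2'.map (fun p => (p.1, PySem.List.pyGetD lst3 p.1 0)))) = M3 := by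
    rw [hmapmap, hM3, ← hs3', hCc, List.map_cons, PySem.List.min?_id_cons]
    rfl
  rw [hM3v]
  rw [show ((c.1, PySem.List.pyGetD lst3 c.1 0)
        :: C2'.map (fun p => (p.1, PySem.List.pyGetD lst3 p.1 0)))
      = C2g.map (fun p => (p.1, PySem.List.pyGetD lst3 p.1 0)) from by
    rw [hCc, List.map_cons]]
  rw [List.filter_map]
  rw [show ((fun q : Int × Int => q.2 == M3) ∘ (fun p : Int × Int => (p.1, PySem.List.pyGetD lst3 p.1 0)))
      = (fun p => PySem.List.pyGetD lst3 p.1 0 == M3) from rfl]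
  -- both sides are now projections of E's last element
  have hb3ne : E.map (fun p : Int × Int => p.1) ≠ [] := by
    simp only [ne_eq, List.map_eq_nil_iff]
    exact hEne
  rw [hb3E, PySem.List.pyGetD_neg_one _ _ hb3ne]
  have hEl := List.getLast?_eq_some_getLast hEne
  have hA : (E.map (fun p : Int × Int => p.1)).getLast? = some ((E.getLast hEne).1) := by
    rw [List.getLast?_map, hEl]; rfl
  have hA2 : some ((E.map (fun p : Int × Int => p.1)).getLast hb3ne) = some ((E.getLast hEne).1) := by
    rw [← List.getLast?_eq_some_getLast hb3ne, hA]
  rw [Option.some.inj hA2]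
  rw [List.getLastD_eq_getLast?, List.getLast?_map, hEl]
  rfl

-- ===== VERDICT (by name: the statement is the Claim_ definition above) =====
theorem count_best_index_spec : Claim_equal_count_best_index := by
  intro lst1 lst2 lst3 _ hpre
  unfold Spec_count_best_index
  exact key_equiv lst1 lst2 lst3 hpre.1
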